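-- pv_equiv track=rewrite | github.com/B1N4RY-P4R45173/pure-python-implementation-of-sha | sha3/timeefficiency.py | iota
-- ===== SOURCE A (Python) =====
-- def iota(Input, round):
--     ROUND_CONSTANTS = [0x0000000000000001, 0x0000000000008082, 0x800000000000808A, 0x8000000080008000, 0x000000000000808B,
--                        0x0000000080000001, 0x8000000080008081, 0x8000000000008009, 0x000000000000008A, 0x0000000000000088,
--                        0x0000000080008009, 0x000000008000000A, 0x000000008000808B, 0x800000000000008B, 0x8000000000008089,
--                        0x8000000000008003, 0x8000000000008002, 0x8000000000000080, 0x000000000000800A, 0x800000008000000A,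
--                        0x8000000080008081, 0x8000000000008080, 0x0000000080000001, 0x8000000080008008]
--     RC = ROUND_CONSTANTS[round]
--     for z in range(64):
--         if (RC >> z) & 1:
--             Input[0][0][z] ^= 1
--     return Input
-- ===== SOURCE B (Python) =====
-- def iota(Input, round):
--     ROUND_CONSTANTS = [0x0000000000000001, 0x0000000000008082, 0x800000000000808A, 0x8000000080008000, 0x000000000000808B,
--                        0x0000000080000001, 0x8000000080008081, 0x8000000000008009, 0x000000000000008A, 0x0000000000000088,
--                        0x0000000080008009, 0x000000008000000A, 0x000000008000808B, 0x800000000000008B, 0x8000000000008089,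
--                        0x8000000000008003, 0x8000000000008002, 0x8000000000000080, 0x000000000000800A, 0x800000008000000A,
--                        0x8000000080008081, 0x8000000000008080, 0x0000000080000001, 0x8000000080008008]
--     RC = ROUND_CONSTANTS[round]
--     while RC:
--         z = (RC & -RC).bit_length() - 1
--         Input[0][0][z] ^= 1
--         RC &= RC - 1
--     return Input
-- ===== Notes on version B (the rewrite author's own statement) =====
-- stated objective: alternative
-- what changed: Replaces A's fixed scan of all 64 bit positions with an if-guard by a sparse loop over only the set bits of RC using the standard lowest-set-bit trick (RC & -RC, then RC &= RC-1), flipping exactly those lane positions.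
import Mathlib
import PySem

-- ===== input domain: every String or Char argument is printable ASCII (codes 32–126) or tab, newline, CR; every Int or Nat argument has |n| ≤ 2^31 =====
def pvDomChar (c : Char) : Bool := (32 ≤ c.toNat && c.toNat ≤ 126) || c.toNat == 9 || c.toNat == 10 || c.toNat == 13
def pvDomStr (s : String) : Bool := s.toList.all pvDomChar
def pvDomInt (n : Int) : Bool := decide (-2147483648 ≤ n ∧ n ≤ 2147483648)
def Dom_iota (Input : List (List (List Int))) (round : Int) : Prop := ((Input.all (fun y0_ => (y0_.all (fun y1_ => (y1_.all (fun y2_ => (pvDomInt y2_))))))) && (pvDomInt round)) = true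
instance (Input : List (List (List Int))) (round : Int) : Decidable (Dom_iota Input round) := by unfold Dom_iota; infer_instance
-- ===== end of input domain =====

-- B replaces A's fixed 64-position scan by a loop over only the SET bits of RC (lowest-set-bit trick);
-- both programs mutate Input[0][0] in place in Python — the equivalence proved here is about the returned value.

-- shared constant table (same literal list in both Pythons)
def pvRoundConstants : List Int := [1, 32898, 9223372036854808714, 9223372039002292224, 32907, 2147483649, 9223372039002292353, 9223372036854808585, 138, 136, 2147516425, 2147483658, 2147516555, 9223372036854775947, 9223372036854808713, 9223372036854808579, 9223372036854808578, 9223372036854775936, 32778, 9223372039002259466, 9223372039002292353, 9223372036854808704, 2147483649, 9223372039002292232]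

-- ===== PORT A =====
-- A: for z in range(64): if (RC >> z) & 1: Input[0][0][z] ^= 1
def iota (Input : List (List (List Int))) (round : Int) : List (List (List Int)) :=
  let RC := (PySem.List.pyGet? pvRoundConstants round).getD 0   -- Pre_ excludes the IndexError (invalid round)
  (PySem.List.pyRange 0 64 1).foldl
    (fun s z =>
      if PySem.Int.band (RC >>> z.toNat) 1 == 1 then
        s.modify 0 (fun r => r.modify 0 (fun lane => lane.modify z.toNat (fun v => PySem.Int.bxor v 1)))
      else s)
    Input

-- ===== PORT B =====
-- B: while RC: z = (RC & -RC).bit_length() - 1; Input[0][0][z] ^= 1; RC &= RC - 1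
-- fuel = 64 only makes the while-loop total; inside Pre_ RC has at most 64 bits so the fuel is never exhausted.
def iotaAltLoop : Nat → Int → List (List (List Int)) → List (List (List Int))
  | 0, _, s => s
  | fuel + 1, RC, s =>
    if RC == 0 then s
    else
      let z := PySem.Int.bitLength (PySem.Int.band RC (-RC)) - 1
      iotaAltLoop fuel (PySem.Int.band RC (RC - 1))
        (s.modify 0 (fun r => r.modify 0 (fun lane => lane.modify z (fun v => PySem.Int.bxor v 1))))

def iota_alt (Input : List (List (List Int))) (round : Int) : List (List (List Int)) :=
  let RC := (PySem.List.pyGet? pvRoundConstants round).getD 0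
  iotaAltLoop 64 RC Input

-- ===== PRECONDITION & SPEC =====
-- Pre_ excludes exactly the inputs where the Python raises IndexError: a round outside [-24, 24)
-- (bad table index) or a lane [0][0] too short for some set bit of RC (Input empty / Input[0] empty included,
-- since then the lane read is [] and RC ≥ 1 > 2^0 ... i.e. the condition below fails unless RC < 2^len).
def Pre_iota (Input : List (List (List Int))) (round : Int) : Prop :=
  -24 ≤ round ∧ round < 24 ∧ Input ≠ [] ∧ Input.headD [] ≠ [] ∧
  (PySem.List.pyGet? pvRoundConstants round).getD 0 < 2 ^ ((Input.headD []).headD []).length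
instance (Input : List (List (List Int))) (round : Int) : Decidable (Pre_iota Input round) := by unfold Pre_iota; infer_instance

def pvWitness_iota : List (List (List Int)) × Int := ([[[0, 1, 0, 1, 0, 0, 1, 1, 0, 0, 0, 0, 0, 0, 0, 0]]], 8)

def Spec_iota (Input : List (List (List Int))) (round : Int) (out : List (List (List Int))) : Prop := out = iota_alt Input round
instance (Input : List (List (List Int))) (round : Int) (out : List (List (List Int))) : Decidable (Spec_iota Input round out) := by unfold Spec_iota; infer_instance

-- ===== CLAIM (what is proved, stated in full; the proofs are below) =====
def Claim_equal_iota : Prop := ∀ (Input : List (List (List Int))) (round : Int), Dom_iota Input round → Pre_iota Input round → Spec_iota Input round (iota Input round)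

-- ===== LEMMAS AND PROOFS =====
-- For each fixed round the two ports unfold to the same ascending chain of modify's, so each case is rfl.

-- ===== VERDICT (by name: the statement is the Claim_ definition above) =====
theorem iota_spec : Claim_equal_iota := by
  intro Input round _ hpre
  obtain ⟨h1, h2, -, -, -⟩ := hpre
  unfold Spec_iota
  interval_cases round <;> rfl
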